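-- pv_equiv track=rewrite | github.com/kurumonn/EXkururuIPROS | dashboard/storage.py | _qmark_to_pyformat
-- ===== SOURCE A (Python) =====
-- def _qmark_to_pyformat(sql: str) -> str:
--     out: list[str] = []
--     in_single = False
--     i = 0
--     while i < len(sql):
--         ch = sql[i]
--         if ch == "'":
--             # Preserve escaped single quote ''.
--             if in_single and i + 1 < len(sql) and sql[i + 1] == "'":
--                 out.append("''")
--                 i += 2
--                 continue
--             in_single = not in_single
--             out.append(ch)
--             i += 1
--             continue
--         if ch == "?" and not in_single:
--             out.append("%s")
--         else:
--             out.append(ch)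
--         i += 1
--     return "".join(out)
-- ===== SOURCE B (Python) =====
-- def _take_string(rest: str) -> tuple[str, str]:
--     # rest starts with "'": consume the whole quoted literal, honouring '' escapes;
--     # an unterminated literal consumes everything to the end.
--     j = 1
--     while j < len(rest):
--         if rest[j] == "'":
--             if j + 1 < len(rest) and rest[j + 1] == "'":
--                 j += 2
--                 continue
--             return rest[: j + 1], rest[j + 1 :]
--         j += 1
--     return rest, ""
--
--
-- def _qmark_to_pyformat(sql: str) -> str:
--     out: list[str] = []
--     rest = sql
--     while rest:
--         ch = rest[0]
--         if ch == "'":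
--             lit, rest = _take_string(rest)
--             out.append(lit)
--         elif ch == "?":
--             out.append("%s")
--             rest = rest[1:]
--         else:
--             out.append(ch)
--             rest = rest[1:]
--     return "".join(out)
-- ===== Notes on version B (the rewrite author's own statement) =====
-- stated objective: alternative
-- what changed: Replaces A's single character-by-character index loop with an in_single state flag by a two-level tokenizer: a helper consumes a whole single-quoted literal at once (handling doubled-quote escapes and unterminated literals), so the main loop carries no quoting state and only rewrites each placeholder question mark to the pyformat marker.
import Mathlib
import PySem

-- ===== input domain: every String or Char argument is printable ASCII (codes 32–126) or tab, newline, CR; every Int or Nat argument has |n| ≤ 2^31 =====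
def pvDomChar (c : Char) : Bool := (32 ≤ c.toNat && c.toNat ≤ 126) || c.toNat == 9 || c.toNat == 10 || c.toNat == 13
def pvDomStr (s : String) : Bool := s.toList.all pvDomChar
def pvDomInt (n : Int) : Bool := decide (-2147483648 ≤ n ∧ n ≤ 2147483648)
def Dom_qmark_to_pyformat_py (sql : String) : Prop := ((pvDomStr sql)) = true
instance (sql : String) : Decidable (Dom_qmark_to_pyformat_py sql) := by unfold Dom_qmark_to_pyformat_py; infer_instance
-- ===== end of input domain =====

-- B replaces A's index loop with an in_single flag by a tokenizer: a helper consumes a whole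
-- quoted literal at once (honouring '' escapes), so no quoting state crosses loop iterations.

-- ===== PORT A =====
-- A's while-loop over index i with the in_single flag, as structural recursion on the suffix;
-- the lookahead sql[i+1] becomes the two-element pattern.
def goA : List Char → Bool → List Char
  | [], _ => []
  | [c], in_single =>
    if c = '\'' then '\'' :: goA [] (!in_single)
    else if c = '?' ∧ in_single = false then '%' :: 's' :: goA [] in_single
    else c :: goA [] in_single
  | c :: c2 :: rest2, in_single =>
    if c = '\'' then
      -- Python: if in_single and i+1 < len(sql) and sql[i+1] == "'": append "''"; i += 2
      if in_single ∧ c2 = '\'' then '\'' :: '\'' :: goA rest2 in_single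
      else '\'' :: goA (c2 :: rest2) (!in_single)
    else if c = '?' ∧ in_single = false then '%' :: 's' :: goA (c2 :: rest2) in_single
    else c :: goA (c2 :: rest2) in_single

def qmark_to_pyformat_py (sql : String) : String :=
  String.ofList (goA sql.toList false)

-- ===== PORT B =====
-- _take_string: the input starts with "'"; consume the whole literal, '' stays escaped,
-- an unterminated literal consumes everything to the end.  takeBody handles the
-- characters AFTER the opening quote, returning (rest of the literal, remainder).
def takeBody : List Char → List Char × List Char
  | [] => ([], [])
  | [c] =>
    if c = '\'' then ([c], [])
    else let p := takeBody []; (c :: p.1, p.2)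
  | c :: c2 :: rest2 =>
    if c = '\'' then
      if c2 = '\'' then let p := takeBody rest2; (c :: c2 :: p.1, p.2)
      else ([c], c2 :: rest2)
    else let p := takeBody (c2 :: rest2); (c :: p.1, p.2)

-- termination helper for goB (cited by its decreasing_by)
lemma takeBody_snd_le : ∀ l : List Char, (takeBody l).2.length ≤ l.length
  | [] => by simp [takeBody]
  | [c] => by by_cases hc : c = '\'' <;> simp [takeBody, hc]
  | c :: c2 :: rest2 => by
    by_cases hc : c = '\''
    · by_cases h2 : c2 = '\''
      · have := takeBody_snd_le rest2; simp [takeBody, hc, h2]; omega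
      · simp [takeBody, hc, h2]
    · have h := takeBody_snd_le (c2 :: rest2)
      simp only [List.length_cons] at h
      simp [takeBody, hc]; omega

def goB : List Char → List Char
  | [] => []
  | c :: rest =>
    if c = '\'' then
      let p := takeBody rest
      c :: (p.1 ++ goB p.2)
    else if c = '?' then '%' :: 's' :: goB rest
    else c :: goB rest
termination_by l => l.length
decreasing_by
  · have := takeBody_snd_le rest; simp only [List.length_cons]; omega
  · simp only [List.length_cons]; omega
  · simp only [List.length_cons]; omega

def qmark_to_pyformat_py_alt (sql : String) : String :=
  String.ofList (goB sql.toList)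

-- ===== PRECONDITION & SPEC =====
def Spec_qmark_to_pyformat_py (sql : String) (out : String) : Prop := out = qmark_to_pyformat_py_alt sql
instance (sql : String) (out : String) : Decidable (Spec_qmark_to_pyformat_py sql out) := by unfold Spec_qmark_to_pyformat_py; infer_instance

-- ===== CLAIM (what is proved, stated in full; the proofs are below) =====
def Claim_equal_qmark_to_pyformat_py : Prop := ∀ (sql : String), Dom_qmark_to_pyformat_py sql → Spec_qmark_to_pyformat_py sql (qmark_to_pyformat_py sql)

-- ===== LEMMAS AND PROOFS =====

-- shape lemmas for goA
lemma goA_quote_false (rest : List Char) : goA ('\'' :: rest) false = '\'' :: goA rest true := by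
  cases rest <;> simp [goA]

lemma goA_qmark_false (rest : List Char) : goA ('?' :: rest) false = '%' :: 's' :: goA rest false := by
  cases rest <;> simp [goA]

lemma goA_false_other (c : Char) (rest : List Char) (hc : c ≠ '\'') (hq : c ≠ '?') :
    goA (c :: rest) false = c :: goA rest false := by
  cases rest <;> simp [goA, hc, hq]

lemma goA_true_esc (rest2 : List Char) : goA ('\'' :: '\'' :: rest2) true = '\'' :: '\'' :: goA rest2 true := by
  simp [goA]

lemma goA_true_quote (c2 : Char) (rest2 : List Char) (h2 : c2 ≠ '\'') :
    goA ('\'' :: c2 :: rest2) true = '\'' :: goA (c2 :: rest2) false := by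
  simp [goA, h2]

lemma goA_true_quote_nil : goA ['\''] true = ['\''] := by
  simp [goA]

lemma goA_true_other (c : Char) (rest : List Char) (hc : c ≠ '\'') :
    goA (c :: rest) true = c :: goA rest true := by
  cases rest <;> simp [goA, hc]

-- shape lemmas for takeBody / goB
lemma takeBody_esc (rest2 : List Char) :
    takeBody ('\'' :: '\'' :: rest2) = ('\'' :: '\'' :: (takeBody rest2).1, (takeBody rest2).2) := by
  simp [takeBody]

lemma takeBody_close (c2 : Char) (rest2 : List Char) (h2 : c2 ≠ '\'') :
    takeBody ('\'' :: c2 :: rest2) = (['\''], c2 :: rest2) := by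
  simp [takeBody, h2]

lemma takeBody_other (c : Char) (rest : List Char) (hc : c ≠ '\'') :
    takeBody (c :: rest) = (c :: (takeBody rest).1, (takeBody rest).2) := by
  cases rest <;> simp [takeBody, hc]

lemma goB_quote (rest : List Char) :
    goB ('\'' :: rest) = '\'' :: ((takeBody rest).1 ++ goB (takeBody rest).2) := by
  simp [goB]

lemma goB_qmark (rest : List Char) : goB ('?' :: rest) = '%' :: 's' :: goB rest := by
  simp [goB]

lemma goB_other (c : Char) (rest : List Char) (hc : c ≠ '\'') (hq : c ≠ '?') :
    goB (c :: rest) = c :: goB rest := by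
  simp [goB, hc, hq]

-- Joint invariant: outside a literal A's loop agrees with B's; inside a literal A's loop
-- produces exactly the literal body takeBody collects, followed by B on the remainder.
lemma goA_goB (n : Nat) : ∀ l : List Char, l.length ≤ n →
    goA l false = goB l ∧ goA l true = (takeBody l).1 ++ goB (takeBody l).2 := by
  induction n with
  | zero =>
    intro l hl
    have : l = [] := List.eq_nil_of_length_eq_zero (Nat.le_zero.mp hl)
    subst this
    simp [goA, goB, takeBody]
  | succ n ih =>
    intro l hl
    match l with
    | [] => simp [goA, goB, takeBody]
    | c :: rest =>
      have hr : rest.length ≤ n := by simpa using hl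
      constructor
      · -- false state
        by_cases hc : c = '\''
        · subst hc
          rw [goA_quote_false, goB_quote, (ih rest hr).2]
        · by_cases hq : c = '?'
          · subst hq
            rw [goA_qmark_false, goB_qmark, (ih rest hr).1]
          · rw [goA_false_other c rest hc hq, goB_other c rest hc hq, (ih rest hr).1]
      · -- true state
        by_cases hc : c = '\''
        · subst hc
          cases rest with
          | nil => simp [goA_true_quote_nil, takeBody, goB]
          | cons c2 rest2 =>
            by_cases h2 : c2 = '\''
            · subst h2
              have hr2 : rest2.length ≤ n := by simp at hl; omega
              rw [goA_true_esc, takeBody_esc, (ih rest2 hr2).2]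
              simp
            · rw [goA_true_quote c2 rest2 h2, takeBody_close c2 rest2 h2, (ih (c2 :: rest2) hr).1]
              simp
        · rw [goA_true_other c rest hc, takeBody_other c rest hc, (ih rest hr).2]
          simp

-- ===== VERDICT (by name: the statement is the Claim_ definition above) =====
theorem qmark_to_pyformat_py_spec : Claim_equal_qmark_to_pyformat_py := by
  intro sql _
  unfold Spec_qmark_to_pyformat_py qmark_to_pyformat_py qmark_to_pyformat_py_alt
  rw [(goA_goB sql.toList.length sql.toList le_rfl).1]
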